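-- pv_equiv track=rewrite | github.com/yeongseon/excel-dbapi | src/excel_dbapi/engine/parser.py | _bind_params
-- ===== SOURCE A (Python) =====
-- from typing import Any, Dict, List, Optional
--
-- def _bind_params(values: List[Any], params: Optional[tuple]) -> List[Any]:
--     if params is None:
--         if any(value == "?" for value in values):
--             raise ValueError("Missing parameters for placeholders")
--         return values
--     bound: List[Any] = []
--     param_index = 0
--     for value in values:
--         if value == "?":
--             if param_index >= len(params):
--                 raise ValueError("Not enough parameters for placeholders")
--             bound.append(params[param_index])
--             param_index += 1
--         else:
--             bound.append(value)
--     if param_index < len(params):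
--         raise ValueError("Too many parameters for placeholders")
--     return bound
-- ===== SOURCE B (Python) =====
-- def _bind_params(values, params):
--     if params is None:
--         if "?" in values:
--             raise ValueError("Missing parameters for placeholders")
--         return values
--     positions = [i for i, v in enumerate(values) if v == "?"]
--     if len(positions) > len(params):
--         raise ValueError("Not enough parameters for placeholders")
--     if len(positions) < len(params):
--         raise ValueError("Too many parameters for placeholders")
--     out = list(values)
--     for i, p in zip(positions, params):
--         out[i] = p
--     return out
-- ===== Notes on version B (the rewrite author's own statement) =====
-- stated objective: alternative
-- what changed: A builds the result by a single stateful append loop consuming params with a running index and validating inline; B first collects the placeholder positions, validates their count against len(params), then copies the list and overwrites it at those indices via zip(positions, params) - index-overwrite instead of sequential accumulation.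
import Mathlib
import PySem

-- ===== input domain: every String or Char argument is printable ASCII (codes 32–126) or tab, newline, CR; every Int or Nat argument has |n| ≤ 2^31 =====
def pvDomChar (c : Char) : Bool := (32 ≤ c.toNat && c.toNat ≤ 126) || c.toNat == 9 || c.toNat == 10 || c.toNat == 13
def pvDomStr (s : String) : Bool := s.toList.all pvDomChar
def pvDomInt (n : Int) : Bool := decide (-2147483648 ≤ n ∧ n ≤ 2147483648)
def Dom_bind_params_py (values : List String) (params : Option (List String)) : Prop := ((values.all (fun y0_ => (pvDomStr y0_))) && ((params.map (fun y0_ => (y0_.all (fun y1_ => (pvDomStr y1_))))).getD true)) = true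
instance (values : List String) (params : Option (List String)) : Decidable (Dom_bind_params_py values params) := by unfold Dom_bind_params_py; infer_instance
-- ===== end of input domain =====

-- ===== PORT A =====
-- B replaces A's single append-and-consume loop by: collect placeholder positions,
-- validate the count, then overwrite a copy of the list at those indices (alternative; no speed claim).
-- A's loop: bound list, param_index; a raise is modelled as none
def bindLoopA (p : List String) : List String → List String → Nat → Option (List String)
  | [], bound, idx => if idx < p.length then none else some bound
  | v :: vs, bound, idx =>
    if v == "?" then
      if idx ≥ p.length then none
      else bindLoopA p vs (bound ++ [p.getD idx ""]) (idx + 1)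
    else bindLoopA p vs (bound ++ [v]) idx

def bind_params_py (values : List String) (params : Option (List String)) : List String :=
  match params with
  | none => if values.any (fun v => v == "?") then [] else values
  | some p => (bindLoopA p values [] 0).getD []

-- ===== PORT B =====
-- the for-loop of B: overwrite out at position i with param p, for (i, p) in zip(positions, params);
-- positions come from enumerate and are ≥ 0, so .toNat is exact here
def overwriteB (pairs : List (Int × String)) (out : List String) : List String :=
  pairs.foldl (fun acc ip => acc.set ip.1.toNat ip.2) out

def bind_params_py_alt (values : List String) (params : Option (List String)) : List String :=
  match params with
  | none => if values.contains "?" then [] else values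
  | some p =>
    let positions := ((PySem.List.enumerate values).filter (fun iv => iv.2 == "?")).map (·.1)
    if positions.length > p.length then []
    else if positions.length < p.length then []
    else overwriteB (positions.zip p) values

-- ===== PRECONDITION & SPEC =====
-- Pre_ excludes exactly the inputs where Python A raises ValueError: params=None with a "?" present,
-- or the number of "?" placeholders differing from len(params).
def Pre_bind_params_py (values : List String) (params : Option (List String)) : Prop :=
  (params = none → "?" ∉ values) ∧ (∀ p ∈ params.toList, values.count "?" = p.length)
instance (values : List String) (params : Option (List String)) : Decidable (Pre_bind_params_py values params) := by unfold Pre_bind_params_py; infer_instance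
def pvWitness_bind_params_py : List String × Option (List String) := (["a", "?"], some ["x"])
def Spec_bind_params_py (values : List String) (params : Option (List String)) (out : List String) : Prop := out = bind_params_py_alt values params
instance (values : List String) (params : Option (List String)) (out : List String) : Decidable (Spec_bind_params_py values params out) := by unfold Spec_bind_params_py; infer_instance

-- ===== CLAIM (what is proved, stated in full; the proofs are below) =====
def Claim_equal_bind_params_py : Prop := ∀ (values : List String) (params : Option (List String)), Dom_bind_params_py values params → Pre_bind_params_py values params → Spec_bind_params_py values params (bind_params_py values params)

-- ===== LEMMAS AND PROOFS =====

-- proof-only bridge: sequential substitution, each "?" consumes the head of the remaining params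
def substB : List String → List String → List String
  | [], _ => []
  | v :: vs, ps => if v == "?" then ps.headD "" :: substB vs ps.tail else v :: substB vs ps

-- proof-only: the placeholder positions as Nats
def posNat : List String → List Nat
  | [] => []
  | v :: vs => if v == "?" then 0 :: (posNat vs).map (· + 1) else (posNat vs).map (· + 1)

lemma posNat_q (vs : List String) : posNat ("?" :: vs) = 0 :: (posNat vs).map (· + 1) := by
  simp [posNat]

lemma posNat_ne {v : String} (vs : List String) (hv : (v == "?") = false) :
    posNat (v :: vs) = (posNat vs).map (· + 1) := by
  simp [posNat, hv]

lemma bindLoopA_eq (p : List String) :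
    ∀ (values acc : List String) (idx : Nat), idx ≤ p.length →
    values.count "?" = p.length - idx →
    bindLoopA p values acc idx = some (acc ++ substB values (p.drop idx)) := by
  intro values
  induction values with
  | nil =>
      intro acc idx hle hc
      simp only [List.count_nil] at hc
      have : ¬ idx < p.length := by omega
      simp [bindLoopA, substB, this]
  | cons v vs ih =>
      intro acc idx hle hc
      by_cases hv : v = "?"
      · subst hv
        simp at hc
        have hlt : idx < p.length := by omega
        have h1 : (p.drop idx).headD "" = p.getD idx "" := by
          simp [List.headD_eq_head?_getD, List.head?_drop, List.getD_eq_getElem?_getD]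
        have h2 : (p.drop idx).tail = p.drop (idx + 1) := by
          simp [List.tail_drop]
        rw [show bindLoopA p ("?" :: vs) acc idx
              = bindLoopA p vs (acc ++ [p.getD idx ""]) (idx + 1) by
            simp [bindLoopA, Nat.not_le.mpr hlt]]
        rw [ih (acc ++ [p.getD idx ""]) (idx + 1) (by omega) (by omega)]
        simp [substB, h2]
      · have hv' : (v == "?") = false := by simp [hv]
        simp [List.count_cons, hv'] at hc
        rw [show bindLoopA p (v :: vs) acc idx = bindLoopA p vs (acc ++ [v]) idx by
          simp [bindLoopA, hv']]
        rw [ih (acc ++ [v]) idx hle (by omega)]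
        simp [substB, hv']

-- the positions computed by the port (from enumerate, start s) are posNat shifted by s
lemma positions_eq (values : List String) :
    ∀ s : Int, ((PySem.List.enumerate values s).filter (fun iv => iv.2 == "?")).map (·.1)
      = (posNat values).map (fun k => s + Int.ofNat k) := by
  induction values with
  | nil => intro s; simp [PySem.List.enumerate_nil, posNat]
  | cons v vs ih =>
      intro s
      rw [PySem.List.enumerate_cons, List.filter_cons]
      by_cases hv : v = "?"
      · subst hv
        rw [if_pos (show ((s, ("?" : String)).2 == "?") = true from rfl),
          List.map_cons, ih (s + 1), posNat_q, List.map_cons, List.map_map]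
        refine congrArg₂ _ (by simp [Int.ofNat_eq_natCast]) (List.map_congr_left fun k _ => ?_)
        simp only [Function.comp_apply, Int.ofNat_eq_natCast]
        push_cast; ring
      · have hv' : (v == "?") = false := by simp [hv]
        rw [if_neg (show ¬ (((s, v).2 == "?") = true) by simp [hv]), ih (s + 1),
          posNat_ne vs hv', List.map_map]
        refine List.map_congr_left fun k _ => ?_
        simp only [Function.comp_apply, Int.ofNat_eq_natCast]
        push_cast; ring

lemma length_posNat (values : List String) : (posNat values).length = values.count "?" := by
  induction values with
  | nil => simp [posNat]
  | cons v vs ih =>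
      by_cases hv : v = "?"
      · subst hv; simp [posNat, ih]
      · have hv' : (v == "?") = false := by simp [hv]
        simp [posNat, hv', List.count_cons, ih]

-- shifting every position by one skips the head of the list being overwritten
lemma overwrite_shift :
    ∀ (pos : List Nat) (ps : List String) (v : String) (vs : List String),
    ((pos.map (fun k => Int.ofNat (k + 1))).zip ps).foldl
        (fun acc ip => acc.set ip.1.toNat ip.2) (v :: vs)
      = v :: ((pos.map Int.ofNat).zip ps).foldl
        (fun acc ip => acc.set ip.1.toNat ip.2) vs := by
  intro pos
  induction pos with
  | nil => intro ps v vs; simp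
  | cons i pos' ih =>
      intro ps v vs
      cases ps with
      | nil => simp
      | cons q qs =>
          simp only [List.map_cons, List.zip_cons_cons, List.foldl_cons]
          have h1 : (Int.ofNat (i + 1)).toNat = i + 1 := rfl
          have h2 : (Int.ofNat i).toNat = i := rfl
          rw [h1, h2, List.set_cons_succ]
          exact ih qs v (vs.set i q)

-- when counts match, overwriting at placeholder positions is sequential substitution
lemma overwrite_eq_substB :
    ∀ (vs ps : List String), vs.count "?" = ps.length →
    overwriteB (((posNat vs).map Int.ofNat).zip ps) vs = substB vs ps := by
  intro vs
  induction vs with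
  | nil =>
      intro ps h
      simp only [List.count_nil] at h
      simp [overwriteB, substB, posNat]
  | cons v vs' ih =>
      intro ps h
      by_cases hv : v = "?"
      · subst hv
        simp at h
        cases ps with
        | nil => simp at h
        | cons q qs =>
            simp only [List.length_cons] at h
            rw [posNat_q]
            simp only [List.map_cons, List.zip_cons_cons, overwriteB, List.foldl_cons,
              List.map_map]
            rw [show ((Int.ofNat 0).toNat) = 0 from rfl, List.set_cons_zero]
            have hcomp : (posNat vs').map (Int.ofNat ∘ (· + 1))
                = (posNat vs').map (fun k => Int.ofNat (k + 1)) := rfl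
            rw [hcomp, overwrite_shift (posNat vs') qs q vs']
            rw [show ((posNat vs').map Int.ofNat |>.zip qs).foldl
                  (fun acc ip => acc.set ip.1.toNat ip.2) vs' = overwriteB _ vs' from rfl]
            rw [ih qs (by omega)]
            simp [substB]
      · have hv' : (v == "?") = false := by simp [hv]
        simp only [List.count_cons, hv', Bool.false_eq_true, if_false] at h
        rw [posNat_ne vs' hv']
        simp only [List.map_map, overwriteB]
        have hcomp : (posNat vs').map (Int.ofNat ∘ (· + 1))
            = (posNat vs').map (fun k => Int.ofNat (k + 1)) := rfl
        rw [hcomp, overwrite_shift (posNat vs') ps v vs']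
        rw [show ((posNat vs').map Int.ofNat |>.zip ps).foldl
              (fun acc ip => acc.set ip.1.toNat ip.2) vs' = overwriteB _ vs' from rfl]
        rw [ih ps h]
        simp [substB, hv']

-- ===== VERDICT (by name: the statement is the Claim_ definition above) =====
theorem bind_params_py_spec : Claim_equal_bind_params_py := by
  intro values params _hdom hpre
  unfold Spec_bind_params_py
  obtain ⟨hnone, hsome⟩ := hpre
  match params with
  | none =>
      have hmem : "?" ∉ values := hnone rfl
      have h1 : values.any (fun v => v == "?") = false := by
        simp only [List.any_eq_false]; intro x hx
        simp; rintro rfl; exact hmem hx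
      have h2 : values.contains "?" = false := by
        cases h : values.contains "?"
        · rfl
        · exact absurd (by simpa using h) hmem
      simp only [bind_params_py, bind_params_py_alt, h1, h2, Bool.false_eq_true, if_false]
  | some p =>
      have hc : values.count "?" = p.length := hsome p (by simp)
      have hA := bindLoopA_eq p values [] 0 (by omega) (by omega)
      have hpos : ((PySem.List.enumerate values).filter (fun iv => iv.2 == "?")).map (·.1)
          = (posNat values).map Int.ofNat := by
        rw [positions_eq values 0]
        exact List.map_congr_left (fun k _ => by simp)
      have hlen' : ((posNat values).map Int.ofNat).length = p.length := by
        simp [length_posNat, hc]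
      simp only [bind_params_py, bind_params_py_alt, hA, Option.getD_some, List.nil_append,
        List.drop_zero]
      rw [hpos]
      simp only [hlen', lt_irrefl, if_false]
      exact (overwrite_eq_substB values p hc).symm
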